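-- pv_equiv track=rewrite | github.com/Flu-iid/py-algo | algo-questions/quera/طول و مجموع ارقام.py | max_maker
-- ===== SOURCE A (Python) =====
-- def max_maker(s, m):
--     num_length = m
--     digital_sum = s
--     max_raw = ""
--     n = 0
--     if s > m*9 or s < 1:
--         return -1
--     while digital_sum > 0:
--         if digital_sum < 10:
--             max_raw += f"{digital_sum}"+(num_length-1)*"0"
--             return int(max_raw)
--         else:
--             max_raw += "9"
--             num_length -= 1
--             digital_sum -= 9
-- ===== SOURCE B (Python) =====
-- def max_maker(s, m):
--     if s > m*9 or s < 1:
--         return -1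
--     q, r = divmod(s, 9)
--     digits = ["9"] * q
--     if r:
--         digits.append(str(r))
--     digits += ["0"] * (m - len(digits))
--     return int("".join(digits))
-- ===== Notes on version B (the rewrite author's own statement) =====
-- stated objective: simpler
-- what changed: Replaces the while loop that peels off one 9 per iteration with a closed-form divmod(s, 9) that lays out the whole digit list (nines, remainder, zero padding to width m) in one shot and joins it.
import Mathlib
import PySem

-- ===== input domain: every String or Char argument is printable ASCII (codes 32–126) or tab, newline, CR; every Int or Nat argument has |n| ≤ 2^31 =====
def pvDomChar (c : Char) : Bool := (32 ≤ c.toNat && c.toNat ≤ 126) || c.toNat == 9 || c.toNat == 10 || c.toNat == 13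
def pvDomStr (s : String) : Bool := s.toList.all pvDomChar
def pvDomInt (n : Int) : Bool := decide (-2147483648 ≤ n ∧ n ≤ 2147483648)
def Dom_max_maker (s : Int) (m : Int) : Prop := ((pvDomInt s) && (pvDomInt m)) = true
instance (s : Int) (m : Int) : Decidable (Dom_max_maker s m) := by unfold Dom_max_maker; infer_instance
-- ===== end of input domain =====

-- B replaces A's 9-peeling while loop with a closed-form divmod(s,9) digit layout; objective: simpler.


-- ===== PORT A =====
-- Python n*"c" (string repetition; empty for n ≤ 0); strings are carried as List Char
def pvRep (n : Int) (c : Char) : List Char := List.replicate n.toNat c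

-- the while loop of A; fuel only makes the recursion structural (one unit per iteration,
-- digital_sum drops by 9 ≥ 1 each iteration, so fuel = s.toNat suffices and the 0 case is unreachable).
-- The `while digital_sum > 0` guard failing would make Python return None; proven unreachable
-- (entered only with digital_sum ≥ 1), the 0 default there is never the result.
def maxLoop (fuel : Nat) (digital_sum num_length : Int) (max_raw : List Char) : Int :=
  match fuel with
  | 0 => 0
  | fuel + 1 =>
    if digital_sum > 0 then
      if digital_sum < 10 then
        -- max_raw += f"{digital_sum}" + (num_length-1)*"0"; return int(max_raw)
        -- (the string is always nonempty digits, so int() always parses: getD 0 never fires)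
        (PySem.Int.ofChars? (max_raw ++ PySem.Int.toChars digital_sum ++ pvRep (num_length - 1) '0')).getD 0
      else
        maxLoop fuel (digital_sum - 9) (num_length - 1) (max_raw ++ ['9'])
    else 0

def max_maker (s : Int) (m : Int) : Int :=
  if s > m * 9 ∨ s < 1 then -1
  else maxLoop s.toNat s m []

-- ===== PORT B =====
-- B builds a list of one-character digit strings, pads it to width m and joins; a Python
-- string is List Char, so "".join(digits) is List.flatten.
def max_maker_alt (s : Int) (m : Int) : Int :=
  if s > m * 9 ∨ s < 1 then -1
  else
    let q := PySem.Int.floordiv s 9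
    let r := PySem.Int.mod s 9
    let digits0 : List (List Char) := List.replicate q.toNat ['9']
    let digits1 := if r = 0 then digits0 else digits0 ++ [PySem.Int.toChars r]
    let digits2 := digits1 ++ List.replicate (m - PySem.List.len digits1).toNat ['0']
    (PySem.Int.ofChars? digits2.flatten).getD 0

-- ===== PRECONDITION & SPEC =====
def Spec_max_maker (s : Int) (m : Int) (out : Int) : Prop := out = max_maker_alt s m
instance (s : Int) (m : Int) (out : Int) : Decidable (Spec_max_maker s m out) := by unfold Spec_max_maker; infer_instance

-- ===== CLAIM (what is proved, stated in full; the proofs are below) =====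
def Claim_equal_max_maker : Prop := ∀ (s : Int) (m : Int), Dom_max_maker s m → Spec_max_maker s m (max_maker s m)

-- ===== LEMMAS AND PROOFS =====

-- the digit string B builds for a remaining sum d and remaining length nl
def pvBody (d nl : Int) : List Char :=
  if PySem.Int.mod d 9 = 0 then
    pvRep (PySem.Int.floordiv d 9) '9' ++ pvRep (nl - PySem.Int.floordiv d 9) '0'
  else
    pvRep (PySem.Int.floordiv d 9) '9' ++ PySem.Int.toChars (PySem.Int.mod d 9) ++
      pvRep (nl - PySem.Int.floordiv d 9 - 1) '0'

lemma pvRep_succ (n : Int) (c : Char) (h : 1 ≤ n) :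
    pvRep n c = c :: pvRep (n - 1) c := by
  unfold pvRep
  have : n.toNat = (n - 1).toNat + 1 := by omega
  rw [this, List.replicate_succ]

lemma maxLoop_eq (fuel : Nat) :
    ∀ (d nl : Int) (raw : List Char), 1 ≤ d → d.toNat ≤ fuel →
      maxLoop fuel d nl raw = (PySem.Int.ofChars? (raw ++ pvBody d nl)).getD 0 := by
  induction fuel with
  | zero => intro d nl raw hd hf; omega
  | succ fuel ih =>
    intro d nl raw hd hf
    unfold maxLoop
    rw [if_pos (by omega)]
    by_cases hlt : d < 10
    · rw [if_pos hlt]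
      have hdiv : PySem.Int.floordiv d 9 = if d = 9 then 1 else 0 := by
        rw [PySem.Int.floordiv_eq_ediv_of_pos (by omega)]; split_ifs <;> omega
      have hmod : PySem.Int.mod d 9 = if d = 9 then 0 else d := by
        rw [PySem.Int.mod_eq_emod_of_pos (by omega)]; split_ifs <;> omega
      unfold pvBody
      by_cases h9 : d = 9
      · subst h9
        have h1 : PySem.Int.toChars 9 = ['9'] := by decide
        have h2 : pvRep 1 '9' = ['9'] := by decide
        simp [h1, h2]
      · rw [hmod, if_neg h9, if_neg (by omega), hdiv, if_neg h9]
        have : pvRep 0 '9' = [] := by decide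
        rw [this]
        simp
    · rw [if_neg hlt]
      rw [ih (d - 9) (nl - 1) (raw ++ ['9']) (by omega) (by omega)]
      have hq1 : 1 ≤ PySem.Int.floordiv d 9 := by
        rw [PySem.Int.floordiv_eq_ediv_of_pos (by omega)]; omega
      have hdiv : PySem.Int.floordiv (d - 9) 9 = PySem.Int.floordiv d 9 - 1 := by
        rw [PySem.Int.floordiv_eq_ediv_of_pos (by omega),
            PySem.Int.floordiv_eq_ediv_of_pos (by omega)]
        omega
      have hmod : PySem.Int.mod (d - 9) 9 = PySem.Int.mod d 9 := by
        rw [PySem.Int.mod_eq_emod_of_pos (by omega), PySem.Int.mod_eq_emod_of_pos (by omega)]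
        omega
      unfold pvBody
      rw [hdiv, hmod]
      rw [pvRep_succ (PySem.Int.floordiv d 9) '9' hq1]
      split_ifs with h0 <;> · congr 1; simp

-- B's flattened digit list is exactly pvBody (nines, remainder digit, zero padding)
lemma pvFlatten_rep (n : Nat) (c : Char) :
    (List.replicate n ([c] : List Char)).flatten = List.replicate n c := by
  induction n with
  | zero => rfl
  | succ n ih => simp [List.replicate_succ, ih]

lemma pvFlatten_eq_pvBody (s m : Int) (hs : 1 ≤ s) :
    ((if PySem.Int.mod s 9 = 0 then List.replicate (PySem.Int.floordiv s 9).toNat (['9'] : List Char)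
       else List.replicate (PySem.Int.floordiv s 9).toNat (['9'] : List Char) ++ [PySem.Int.toChars (PySem.Int.mod s 9)]) ++
      List.replicate (m - PySem.List.len (if PySem.Int.mod s 9 = 0 then List.replicate (PySem.Int.floordiv s 9).toNat (['9'] : List Char)
       else List.replicate (PySem.Int.floordiv s 9).toNat (['9'] : List Char) ++ [PySem.Int.toChars (PySem.Int.mod s 9)])).toNat ['0']).flatten
    = pvBody s m := by
  unfold pvBody pvRep
  have hdiv : PySem.Int.floordiv s 9 = s / 9 := PySem.Int.floordiv_eq_ediv_of_pos (by omega)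
  have hmod : PySem.Int.mod s 9 = s % 9 := PySem.Int.mod_eq_emod_of_pos (by omega)
  have hmr : 0 ≤ s % 9 ∧ s % 9 < 9 := ⟨Int.emod_nonneg s (by omega), Int.emod_lt_of_pos s (by omega)⟩
  rw [hdiv, hmod]
  by_cases h0 : s % 9 = 0
  · simp only [if_pos h0, List.flatten_append, pvFlatten_rep, PySem.List.len_eq]
    congr 2
    simp only [List.length_replicate]
    omega
  · simp only [if_neg h0, List.flatten_append, pvFlatten_rep, PySem.List.len_eq,
      List.flatten_cons, List.flatten_nil, List.append_nil, List.length_append,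
      List.length_replicate, List.length_singleton]
    have hpad : (m - (((s / 9).toNat + 1 : Nat) : Int)).toNat = (m - s / 9 - 1).toNat := by omega
    rw [hpad]

-- ===== VERDICT (by name: the statement is the Claim_ definition above) =====
theorem max_maker_spec : Claim_equal_max_maker := by
  intro s m _
  unfold Spec_max_maker max_maker max_maker_alt
  by_cases h : s > m * 9 ∨ s < 1
  · rw [if_pos h, if_pos h]
  · rw [if_neg h, if_neg h]
    rw [maxLoop_eq s.toNat s m [] (by omega) (le_refl _)]
    show (PySem.Int.ofChars? ([] ++ pvBody s m)).getD 0 = _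
    rw [← pvFlatten_eq_pvBody s m (by omega)]
    simp
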